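-- pv_equiv track=rewrite | github.com/fitz-s/openclaw-finance | scripts/query_registry_compiler.py | status_from_fetches
-- ===== SOURCE A (Python) =====
-- from typing import Any
--
-- def status_from_fetches(fetch_records: list[dict[str, Any]]) -> str:
--     statuses = {str(record.get('status') or '').lower() for record in fetch_records if isinstance(record, dict)}
--     if 'rate_limited' in statuses:
--         return 'rate_limited'
--     if 'failed' in statuses:
--         return 'failed'
--     if 'partial' in statuses:
--         return 'partial'
--     if 'ok' in statuses:
--         return 'ok'
--     return 'unknown'
-- ===== SOURCE B (Python) =====
-- def status_from_fetches(fetch_records: list) -> str: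
--     order = ('rate_limited', 'failed', 'partial', 'ok')
--     best = None
--     for record in fetch_records:
--         if not isinstance(record, dict):
--             continue
--         s = str(record.get('status') or '').lower()
--         try:
--             r = order.index(s)
--         except ValueError:
--             continue
--         if best is None or r < best:
--             best = r
--     return order[best] if best is not None else 'unknown'
-- ===== Notes on version B (the rewrite author's own statement) =====
-- stated objective: alternative
-- what changed: Replaces A's build-a-set-then-four-ordered-membership-tests with a single fold that keeps the minimum priority rank seen among recognized statuses and decodes it at the end.
import Mathlib
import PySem

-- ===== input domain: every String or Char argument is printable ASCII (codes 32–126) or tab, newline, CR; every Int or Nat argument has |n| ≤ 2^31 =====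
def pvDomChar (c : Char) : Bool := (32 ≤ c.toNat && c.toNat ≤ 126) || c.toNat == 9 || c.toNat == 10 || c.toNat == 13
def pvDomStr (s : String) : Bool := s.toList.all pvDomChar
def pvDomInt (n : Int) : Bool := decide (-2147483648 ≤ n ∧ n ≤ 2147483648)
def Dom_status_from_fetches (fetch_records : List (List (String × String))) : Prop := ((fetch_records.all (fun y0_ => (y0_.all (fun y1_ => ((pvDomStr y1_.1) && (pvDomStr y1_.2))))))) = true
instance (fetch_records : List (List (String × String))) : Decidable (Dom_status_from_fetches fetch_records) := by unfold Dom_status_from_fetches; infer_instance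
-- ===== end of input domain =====

-- B replaces A's build-a-set-then-four-ordered-membership-tests by one fold keeping the minimum
-- priority rank among recognized statuses (alternative decomposition, same O(n) cost).

-- shared line of both Pythons: str(record.get('status') or '').lower()
-- (record is typed as a string->string dict, so isinstance(record, dict) is always true here)
def pvNormStatus (record : List (String × String)) : String :=
  PySem.Str.lower (((PySem.Dict.mk record).get? "status").getD "")

-- ===== PORT A =====
def status_from_fetches (fetch_records : List (List (String × String))) : String :=
  let statuses : PySem.Set String :=
    PySem.Set.ofList (fetch_records.map (fun record => pvNormStatus record))
  if PySem.Set.contains statuses "rate_limited" then "rate_limited"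
  else if PySem.Set.contains statuses "failed" then "failed"
  else if PySem.Set.contains statuses "partial" then "partial"
  else if PySem.Set.contains statuses "ok" then "ok"
  else "unknown"

-- ===== PORT B =====
def pvOrder : List String := ["rate_limited", "failed", "partial", "ok"]

-- the loop body of Source B: order.index with try/except is PySem.List.index? (none = ValueError)
def pvStep (best : Option Nat) (record : List (String × String)) : Option Nat :=
  match PySem.List.index? pvOrder (pvNormStatus record) with
  | none => best
  | some r =>
    match best with
    | none => some r
    | some b0 => if r < b0 then some r else some b0

def status_from_fetches_alt (fetch_records : List (List (String × String))) : String :=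
  match fetch_records.foldl pvStep none with
  | some b0 => pvOrder.getD b0 "unknown"
  | none => "unknown"

-- ===== PRECONDITION & SPEC =====
def Spec_status_from_fetches (fetch_records : List (List (String × String))) (out : String) : Prop := out = status_from_fetches_alt fetch_records
instance (fetch_records : List (List (String × String))) (out : String) : Decidable (Spec_status_from_fetches fetch_records out) := by unfold Spec_status_from_fetches; infer_instance

-- ===== CLAIM (what is proved, stated in full; the proofs are below) =====
def Claim_equal_status_from_fetches : Prop := ∀ (fetch_records : List (List (String × String))), Dom_status_from_fetches fetch_records → Spec_status_from_fetches fetch_records (status_from_fetches fetch_records)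

-- ===== LEMMAS AND PROOFS =====

-- proof-side numeric rank (4 = unrecognized)
def pvRk (s : String) : Nat :=
  if s = "rate_limited" then 0 else if s = "failed" then 1
  else if s = "partial" then 2 else if s = "ok" then 3 else 4

theorem index?_pvOrder (s : String) :
    PySem.List.index? pvOrder s = if pvRk s < 4 then some (pvRk s) else none := by
  by_cases h0 : s = "rate_limited"
  · subst h0; decide
  · by_cases h1 : s = "failed"
    · subst h1; decide
    · by_cases h2 : s = "partial"
      · subst h2; decide
      · by_cases h3 : s = "ok"
        · subst h3; decide
        · rw [(PySem.List.index?_eq_none_iff _ _).mpr (by simp [pvOrder, h0, h1, h2, h3])]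
          simp [pvRk, h0, h1, h2, h3]

def pvToN (b : Option Nat) : Nat := b.getD 4

def pvEnc (n : Nat) : Option Nat := if n < 4 then some n else none

def pvInv (b : Option Nat) : Prop := ∀ x, b = some x → x < 4

theorem pvStep_toN (b : Option Nat) (r : List (String × String)) (hb : pvInv b) :
    pvToN (pvStep b r) = Nat.min (pvToN b) (pvRk (pvNormStatus r)) := by
  unfold pvStep
  rw [index?_pvOrder]
  by_cases h : pvRk (pvNormStatus r) < 4
  · simp only [h, if_pos]
    cases b with
    | none => simp [pvToN]; omega
    | some b0 =>
      have hb0 := hb b0 rfl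
      by_cases hlt : pvRk (pvNormStatus r) < b0
      · simp [pvToN, hlt]; omega
      · simp [pvToN, hlt]; omega
  · simp only [h, if_neg, not_false_iff]
    cases b with
    | none => simp [pvToN]; omega
    | some b0 =>
      have hb0 := hb b0 rfl
      simp [pvToN]; omega

theorem pvStep_inv (b : Option Nat) (r : List (String × String)) (hb : pvInv b) :
    pvInv (pvStep b r) := by
  unfold pvStep
  rw [index?_pvOrder]
  by_cases h : pvRk (pvNormStatus r) < 4
  · simp only [h, if_pos]
    cases b with
    | none => intro x hx; simp at hx; omega
    | some b0 =>
      have hb0 := hb b0 rfl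
      intro x hx
      by_cases hlt : pvRk (pvNormStatus r) < b0 <;> simp [hlt] at hx <;> omega
  · simpa [h] using hb

theorem pvFold_eq (l : List (List (String × String))) :
    ∀ b, pvInv b →
    l.foldl pvStep b = pvEnc ((l.map (fun r => pvRk (pvNormStatus r))).foldl Nat.min (pvToN b)) := by
  induction l with
  | nil =>
    intro b hb
    cases b with
    | none => simp [pvToN, pvEnc]
    | some b0 => have := hb b0 rfl; simp [pvToN, pvEnc, this]
  | cons r l ih =>
    intro b hb
    simp only [List.foldl_cons, List.map_cons]
    rw [ih _ (pvStep_inv b r hb), pvStep_toN b r hb]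

-- min-fold bracket
theorem minfold_le_iff (ns : List Nat) : ∀ (a k : Nat),
    ns.foldl Nat.min a ≤ k ↔ a ≤ k ∨ ∃ n ∈ ns, n ≤ k := by
  induction ns with
  | nil => intro a k; simp
  | cons n ns ih =>
    intro a k
    rw [List.foldl_cons, ih]
    have hmin : Nat.min a n ≤ k ↔ a ≤ k ∨ n ≤ k := Std.min_le
    simp only [List.mem_cons]
    constructor
    · rintro (h | ⟨m, hm, hmk⟩)
      · rcases hmin.mp h with h' | h'
        · exact Or.inl h'
        · exact Or.inr ⟨n, Or.inl rfl, h'⟩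
      · exact Or.inr ⟨m, Or.inr hm, hmk⟩
    · rintro (h | ⟨m, rfl | hm, hmk⟩)
      · exact Or.inl (hmin.mpr (Or.inl h))
      · exact Or.inl (hmin.mpr (Or.inr hmk))
      · exact Or.inr ⟨m, hm, hmk⟩

theorem pvRk_eq_zero_iff (s : String) : pvRk s = 0 ↔ s = "rate_limited" := by
  unfold pvRk; split_ifs <;> simp_all

theorem pvRk_eq_one_iff (s : String) : pvRk s = 1 ↔ s = "failed" := by
  unfold pvRk; split_ifs <;> simp_all

theorem pvRk_eq_two_iff (s : String) : pvRk s = 2 ↔ s = "partial" := by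
  unfold pvRk; split_ifs <;> simp_all

theorem pvRk_eq_three_iff (s : String) : pvRk s = 3 ↔ s = "ok" := by
  unfold pvRk; split_ifs <;> simp_all

-- ===== VERDICT (by name: the statement is the Claim_ definition above) =====
theorem status_from_fetches_spec : Claim_equal_status_from_fetches := by
  intro fetch_records _
  unfold Spec_status_from_fetches status_from_fetches status_from_fetches_alt
  rw [pvFold_eq fetch_records none (by intro x hx; cases hx)]
  set l : List String := fetch_records.map (fun r => pvNormStatus r) with hl
  have hmap : fetch_records.map (fun r => pvRk (pvNormStatus r)) = l.map pvRk := by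
    simp [hl, List.map_map, Function.comp]
  rw [hmap]
  have hMle : ∀ k, (l.map pvRk).foldl Nat.min (pvToN none) ≤ k ↔ 4 ≤ k ∨ ∃ s ∈ l, pvRk s ≤ k := by
    intro k
    rw [minfold_le_iff]
    simp [pvToN]
  set M := (l.map pvRk).foldl Nat.min (pvToN none) with hM
  have hM4 : M ≤ 4 := by rw [hMle]; left; rfl
  have hmem : ∀ x, PySem.Set.contains (PySem.Set.ofList l) x = true ↔ x ∈ l := by
    intro x; rw [PySem.Set.contains_iff, PySem.Set.mem_ofList]
  by_cases c0 : "rate_limited" ∈ l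
  · have h0 : M = 0 := by
      have : M ≤ 0 := by rw [hMle]; right; exact ⟨_, c0, by simp [pvRk]⟩
      omega
    simp [c0, h0, pvEnc, pvOrder]
  · have n0 : ¬ M ≤ 0 := by
      rw [hMle]; rintro (h | ⟨s, hs, hrk⟩); · omega
      exact c0 ((pvRk_eq_zero_iff s).mp (by omega) ▸ hs)
    by_cases c1 : "failed" ∈ l
    · have h1 : M = 1 := by
        have : M ≤ 1 := by rw [hMle]; right; exact ⟨_, c1, by simp [pvRk]⟩
        omega
      simp [c0, c1, h1, pvEnc, pvOrder]
    · have n1 : ¬ M ≤ 1 := by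
        rw [hMle]; rintro (h | ⟨s, hs, hrk⟩); · omega
        have hc : pvRk s = 0 ∨ pvRk s = 1 := by omega
        rcases hc with h' | h'
        · exact c0 ((pvRk_eq_zero_iff s).mp h' ▸ hs)
        · exact c1 ((pvRk_eq_one_iff s).mp h' ▸ hs)
      by_cases c2 : "partial" ∈ l
      · have h2 : M = 2 := by
          have : M ≤ 2 := by rw [hMle]; right; exact ⟨_, c2, by simp [pvRk]⟩
          omega
        simp [c0, c1, c2, h2, pvEnc, pvOrder]
      · have n2 : ¬ M ≤ 2 := by
          rw [hMle]; rintro (h | ⟨s, hs, hrk⟩); · omega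
          have hc : pvRk s = 0 ∨ pvRk s = 1 ∨ pvRk s = 2 := by omega
          rcases hc with h' | h' | h'
          · exact c0 ((pvRk_eq_zero_iff s).mp h' ▸ hs)
          · exact c1 ((pvRk_eq_one_iff s).mp h' ▸ hs)
          · exact c2 ((pvRk_eq_two_iff s).mp h' ▸ hs)
        by_cases c3 : "ok" ∈ l
        · have h3 : M = 3 := by
            have : M ≤ 3 := by rw [hMle]; right; exact ⟨_, c3, by simp [pvRk]⟩
            omega
          simp [c0, c1, c2, c3, h3, pvEnc, pvOrder]
        · have n3 : ¬ M ≤ 3 := by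
            rw [hMle]; rintro (h | ⟨s, hs, hrk⟩); · omega
            have hc : pvRk s = 0 ∨ pvRk s = 1 ∨ pvRk s = 2 ∨ pvRk s = 3 := by omega
            rcases hc with h' | h' | h' | h'
            · exact c0 ((pvRk_eq_zero_iff s).mp h' ▸ hs)
            · exact c1 ((pvRk_eq_one_iff s).mp h' ▸ hs)
            · exact c2 ((pvRk_eq_two_iff s).mp h' ▸ hs)
            · exact c3 ((pvRk_eq_three_iff s).mp h' ▸ hs)
          have h4 : M = 4 := by omega
          simp [c0, c1, c2, c3, h4, pvEnc]
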